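/- GENERATED by mk_final_copies.py from the proof of the farm's unit `start_decoder.R19` (farm:start_decoder.R19.1: Proof.lean) as the
   re-elaboration sweep compiled it — do not edit. -/
import Asan.CheckWalk
import Vorbis.Spec.Units.start_decoder_R19
import Vorbis.Spec.Worked.start_decoder_R19_Lemmas

/-!
  Unit `start_decoder.R19` (0x11682e – 0x116878, stb_vorbis_fixed.c 4226 – 4232): `f->first_audio_page_offset = …; return TRUE`.

  From the entry assertion `AtR19` (SD.11 + T1 + the final test, `rbp = f`) both arms reach the common epilogue 0x113b22 with
  eax = dword `[R + 20H]` = 1 (ONE20) and `AtERR` with `Done` (SD.12). The only stores are pushes of return addresses / the frame of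
  stb_vorbis_get_file_offset below the steady stack pointer and the dword `[f + 80, f + 84)`: the pure lemmas of Lemmas.lean
  (`R19_done_carry`, `R19_exit`) carry the invariant over them.
-/

open X86 X86.User Asan Vorbis Vorbis.Spec Vorbis.Spec.StartDecoder

set_option maxRecDepth 4000
set_option maxHeartbeats 4000000

/-- Segment R19 of `start_decoder`: the check of `f->next_seg`, the call of `stb_vorbis_get_file_offset` on the arm
`next_seg = −1`, the checked store of `first_audio_page_offset` on both arms, `mov eax, [rsp+20H] ; jmp 113b22`. -/
theorem Vorbis.Spec.Worked.start_decoder_R19_ok : Vorbis.Spec.start_decoder_R19.Statement := by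
  intro Lay hLay μ hμ u₀ hcode hload4 hgfo hstore4 g v hat
  -- 1. the entry assertion `AtR19` (0x11682e): the ghost arenas, the common part `Frame`, `Hand`, `Late` (SD.11)
  obtain ⟨A9, A10, A, hb⟩ := hat
  have hfr := hb.frame
  have hhand := hb.hand
  have hlate := hb.late
  -- the state at the function's entry, as a variable; its `AtEntry` (he_room, he_top, he_stack … are about `e`)
  obtain ⟨e, hge⟩ : ∃ e, g.e = e := ⟨_, rfl⟩
  have he := hfr.entry
  rw [hge] at he
  v_entry he
  have he_room' : 7340032 + 1888 ≤ (e.reg .rsp).toNat := he_room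
  have he_stack' : Lay.Has (e.reg .rsp - 1888) 1896 := he_stack
  -- the ghosts `f`, `RA`, `R` in the entry state's registers (the walker's addresses are words over `e.reg`)
  have hf : g.f = (e.reg .rdi).toNat := by
    unfold Ghost.f
    rw [hge]
  have hRA : g.RA = (e.reg .rsp).toNat := by
    unfold Ghost.RA
    rw [hge]
  have hR : g.R = (e.reg .rsp).toNat - 1480 := by
    unfold Ghost.R
    rw [hRA]
  -- `*f` lies in the data space, above the input
  have hobr : 0x400000 ≤ (e.reg .rdi).toNat ∧ (e.reg .rdi).toNat + 1808 ≤ 0xC00000 := by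
    have h := hlate.bits.OBR
    simp only [voff] at h
    rw [hf] at h
    exact h
  -- `*f` does not meet start_decoder's own stack
  have hplace : (e.reg .rsp).toNat + 8 ≤ (e.reg .rdi).toNat ∨ (e.reg .rdi).toNat + 1808 ≤ 0x700000 ∨
      0x800000 ≤ (e.reg .rdi).toNat := by
    have h := Vorbis.Spec.start_decoder_R19.R19_obj_place hfr hhand
    rw [hf, hRA] at h
    exact h
  -- 2. the present state: rip, rsp = R, rbp = f, the slot ONE20 (`dword [R + 20H] = 1`), the code span, DF / MXCSR
  have w_rip : v.rip = Vorbis.L.start_decoder.cut326 := hfr.rip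
  have c_rsp : v.reg .rsp = e.reg .rsp - 1480 := by
    rw [hfr.rsp, hR, ← addr_sub_lit (e.reg .rsp).toNat 1480 (by omega), addr_toNat]
  have c_rbp : v.reg .rbp = e.reg .rdi := by
    rw [hb.rbp, hf, addr_toNat]
  have k_one : v.mem.readLE (e.reg .rsp - 1448) 4 = 1 := by
    have h := hlate.consts.one20
    have e1 : g.R + 0x20 = (e.reg .rsp).toNat - 1448 := by omega
    rw [e1] at h
    unfold Mem.u32 at h
    rw [← addr_sub_lit (e.reg .rsp).toNat 1448 (by omega), addr_toNat] at h
    exact h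
  have w_kept : RegsKept [.rsp] v v := RegsKept.refl _ _
  have w_eq : Mem.EqOn Vorbis.L.textLo Vorbis.L.textHi u₀.mem v.mem := hfr.code
  have hdf : v.flags .df = false := (show abiInv _ from hfr.inv).1
  have hmx : v.mxcsr &&& 0x1F80 = 0x1F80 := (show abiInv _ from hfr.inv).2
  have hsse := Vorbis.sseOK_of_abiInv hfr.inv
  -- the callee's contract, for the live objects and frames of the moment (the own protected frame is active)
  have hgfo' := hgfo A.2 g.frames'
  -- 3. the walk: both arms, up to the call's return on the arm `next_seg = −1`
  u_walk hcode [hμ.vendor] until [Vorbis.L.start_decoder.cut4] span [Vorbis.L.textLo, Vorbis.L.textHi] side (v_side)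
  case check_116835 =>
    -- 0x116835 (line 4226): the load of `f->next_seg`, a field of `*f`
    have hun : ShadowUntouched v.mem s_116835.mem := by v_untouched
    have hs : Site (Live (stackObjs g.frames' ++ A.2)) (g.f + 1752) 4 :=
      hlate.bits.site_field hlate.env.live 1752 4 (by omega) (by omega) rfl
    refine check_site hfr.shadow hun hs ?_
    rw [hf]
    u_omega
  case check_116868 =>
    -- 0x116868 (line 4229): the store of `f->first_audio_page_offset = 0`
    have hun : ShadowUntouched v.mem s_116868.mem := by v_untouched
    have hs : Site (Live (stackObjs g.frames' ++ A.2)) (g.f + 80) 4 :=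
      hlate.bits.site_field hlate.env.live 80 4 (by omega) (by omega) rfl
    refine check_site hfr.shadow hun hs ?_
    rw [hf]
    u_omega
  case call_inv =>
    v_inv
  case pre_116846 =>
    -- 0x116846 (line 4227): `stb_vorbis_get_file_offset(f)`: the shadow layer below the pushed return address, `*f` live
    have hun : ShadowUntouched v.mem s_116846.mem := by v_untouched
    refine ⟨⟨?_, hfr.offText⟩, ?_⟩
    · have e1 : (s_116846.reg .rsp).toNat + 8 = g.R := by
        rw [w_rsp, hR]
        u_omega
      rw [e1]
      exact hfr.shadow.untouched hun
    · rw [w_rdi, ← hf]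
      exact Vorbis.Spec.start_decoder_R19.R19_objLive hhand
  case cont =>
    -- 0x116878 → 0x113b22 with eax = 1: the exit on the path `next_seg ≠ −1`
    refine ReachVia.done ?_
    have hsame : Mem.SameExcept [⟨(e.reg .rsp).toNat - 1544, (e.reg .rsp).toNat - 1480⟩,
        ⟨(e.reg .rdi).toNat + 80, (e.reg .rdi).toNat + 84⟩] v.mem s_116878.mem := by
      u_same
    rw [← hf] at hsame
    refine Vorbis.Spec.start_decoder_R19.R19_exit hb w_rip ?_ w_eq ?_ ?_ ?_ ?_ hsame
    · rw [w_rsp, hR, ← addr_sub_lit (e.reg .rsp).toNat 1480 (by omega), addr_toNat]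
    · v_inv
    · rw [w_rax]
      rfl
    · omega
    · omega
  case cont =>
    -- after the return of stb_vorbis_get_file_offset (0x11684b)
    v_after_call w_rsp_116846 w_mem_116846
    have k_one_c : s_116846.mem.readLE (e.reg .rsp - 1448) 4 = 1 := by u_resolve
    rw [w_mem_116846] at k_one_c
    have k_one_r : s_116846r.mem.readLE (e.reg .rsp - 1448) 4 = 1 := by u_frame k_one_c
    obtain ⟨z, w_rax⟩ : ∃ z, s_116846r.reg .rax = z := ⟨_, rfl⟩
    u_walk hcode [hμ.vendor] until [Vorbis.L.start_decoder.cut4] span [Vorbis.L.textLo, Vorbis.L.textHi] side (v_side)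
    case check_116852 =>
      -- 0x116852 (line 4227): the store of `f->first_audio_page_offset = stb_vorbis_get_file_offset(f)`
      have hun : ShadowUntouched v.mem s_116852.mem := by v_untouched
      have hs : Site (Live (stackObjs g.frames' ++ A.2)) (g.f + 80) 4 :=
        hlate.bits.site_field hlate.env.live 80 4 (by omega) (by omega) rfl
      refine check_site hfr.shadow hun hs ?_
      rw [hf]
      u_omega
    case cont =>
      -- 0x11685f → 0x113b22 with eax = 1: the exit on the path `next_seg = −1`
      refine ReachVia.done ?_
      have hsame : Mem.SameExcept [⟨(e.reg .rsp).toNat - 1544, (e.reg .rsp).toNat - 1480⟩,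
          ⟨(e.reg .rdi).toNat + 80, (e.reg .rdi).toNat + 84⟩] v.mem s_11685f.mem := by
        u_same
      rw [← hf] at hsame
      refine Vorbis.Spec.start_decoder_R19.R19_exit hb w_rip ?_ w_eq ?_ ?_ ?_ ?_ hsame
      · rw [w_rsp, hR, ← addr_sub_lit (e.reg .rsp).toNat 1480 (by omega), addr_toNat]
      · v_inv
      · rw [w_rax]
        rfl
      · omega
      · omega

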